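-- pv_equiv track=rewrite | github.com/abdulmajid18/ds-2023-python | 2025/sliding_window_&_two_pointer/hard/maximum_score_of_a_good_subarray.py | maximumScoreBruteForce
-- ===== SOURCE A (Python) =====
-- from typing import List
--
-- def maximumScoreBruteForce(nums: List[int], k: int) -> int:
--     max_score = 0
--     n = len(nums)
--     for i in range(k, -1, -1):
--         for j in range(k, n):
--             min_val = min(nums[i:j + 1])
--             score = min_val * (j - i + 1)
--             max_score = max(max_score, score)
--     return max_score
-- ===== SOURCE B (Python) =====
-- def maximumScoreBruteForce(nums, k):
--     n = len(nums)
--     if k < 0 or k >= n: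
--         return 0
--     best = 0
--     left_min = nums[k]
--     for i in range(k, -1, -1):
--         left_min = min(left_min, nums[i])
--         cur = left_min
--         for j in range(k, n):
--             cur = min(cur, nums[j])
--             best = max(best, cur * (j - i + 1))
--     return best
-- ===== Notes on version B (the rewrite author's own statement) =====
-- stated objective: faster
-- what changed: B maintains running minima (a left minimum over nums[i..k] updated as i walks down, and a running minimum extended rightward over j), eliminating A's inner min(nums[i:j+1]) slice-scan entirely.
import Mathlib
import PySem

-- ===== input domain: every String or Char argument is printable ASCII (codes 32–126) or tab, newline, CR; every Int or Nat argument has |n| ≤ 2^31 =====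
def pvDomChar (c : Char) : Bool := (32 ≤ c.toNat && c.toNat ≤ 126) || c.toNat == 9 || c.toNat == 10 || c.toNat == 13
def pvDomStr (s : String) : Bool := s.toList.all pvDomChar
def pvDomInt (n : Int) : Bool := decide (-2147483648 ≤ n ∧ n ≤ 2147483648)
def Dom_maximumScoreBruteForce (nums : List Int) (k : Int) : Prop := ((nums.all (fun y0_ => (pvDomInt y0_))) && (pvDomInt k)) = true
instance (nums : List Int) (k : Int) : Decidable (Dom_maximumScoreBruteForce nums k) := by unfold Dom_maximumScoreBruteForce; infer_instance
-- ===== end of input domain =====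

-- B replaces A's inner min(nums[i:j+1]) slice scan by two running minima (O(n^3) → O(n^2)).

-- ===== PORT A =====
-- Literal port of A.  Python's min() raises on an empty sequence, but inside the loops
-- i ≤ k ≤ j holds, so the slice nums[i:j+1] is provably nonempty and `.getD 0` is unreachable.
def maximumScoreBruteForce (nums : List Int) (k : Int) : Int :=
  let n : Int := nums.length
  (PySem.List.pyRange k (-1) (-1)).foldl (fun max_score i =>
    (PySem.List.pyRange k n 1).foldl (fun max_score j =>
      let min_val := (PySem.List.min? (PySem.List.slice nums (some i) (some (j + 1))) (fun x => x)).getD 0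
      let score := min_val * (j - i + 1)
      max max_score score) max_score) 0

-- ===== PORT B =====
def maximumScoreBruteForce_alt (nums : List Int) (k : Int) : Int :=
  let n : Int := nums.length
  if k < 0 ∨ n ≤ k then 0
  else
    ((PySem.List.pyRange k (-1) (-1)).foldl (fun (s : Int × Int) i =>
        let left_min := min s.1 (PySem.List.pyGetD nums i 0)
        let r := (PySem.List.pyRange k n 1).foldl (fun (t : Int × Int) j =>
            let cur := min t.1 (PySem.List.pyGetD nums j 0)
            (cur, max t.2 (cur * (j - i + 1)))) (left_min, s.2)
        (left_min, r.2)) (PySem.List.pyGetD nums k 0, 0)).2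

-- ===== PRECONDITION & SPEC =====
def Spec_maximumScoreBruteForce (nums : List Int) (k : Int) (out : Int) : Prop := out = maximumScoreBruteForce_alt nums k
instance (nums : List Int) (k : Int) (out : Int) : Decidable (Spec_maximumScoreBruteForce nums k out) := by unfold Spec_maximumScoreBruteForce; infer_instance

-- ===== CLAIM (what is proved, stated in full; the proofs are below) =====
def Claim_equal_maximumScoreBruteForce : Prop := ∀ (nums : List Int) (k : Int), Dom_maximumScoreBruteForce nums k → Spec_maximumScoreBruteForce nums k (maximumScoreBruteForce nums k)

-- ===== LEMMAS AND PROOFS =====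

/-- min of a nonempty list, Python-style (0 for [] is never used). -/
def pvListMin : List Int → Int
  | [] => 0
  | x :: t => t.foldl min x

/-- min of nums[i..j] (inclusive). -/
def pvSegMin (nums : List Int) (i j : Int) : Int :=
  pvListMin (PySem.List.slice nums (some i) (some (j + 1)))

theorem pvFoldlMinShift (t : List Int) (x y : Int) :
    t.foldl min (min x y) = min x (t.foldl min y) := by
  induction t generalizing y with
  | nil => simp
  | cons a t ih =>
    simp only [List.foldl_cons]
    rw [min_assoc]
    exact ih (min y a)

theorem pvListMin_cons (x : Int) (s : List Int) (hs : s ≠ []) :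
    pvListMin (x :: s) = min x (pvListMin s) := by
  cases s with
  | nil => exact absurd rfl hs
  | cons a t => simp [pvListMin]; exact pvFoldlMinShift t x a

theorem pvListMin_append (s : List Int) (x : Int) (hs : s ≠ []) :
    pvListMin (s ++ [x]) = min (pvListMin s) x := by
  cases s with
  | nil => exact absurd rfl hs
  | cons y t => simp [pvListMin, List.foldl_append]

theorem pvListMin_le (s : List Int) (x : Int) (hx : x ∈ s) : pvListMin s ≤ x := by
  cases s with
  | nil => simp at hx
  | cons y t =>
    rcases List.mem_cons.mp hx with h | h
    · subst h; exact (PySem.List.foldl_min_le t x).1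
    · exact (PySem.List.foldl_min_le t y).2 x h

theorem pvSeg_eq (nums : List Int) {i j : Int} (hi : 0 ≤ i) (hij : i ≤ j) :
    PySem.List.slice nums (some i) (some (j + 1))
      = (nums.drop i.toNat).take ((j - i).toNat + 1) := by
  rw [PySem.List.slice_toNat nums hi (by omega)]
  congr 1
  omega

theorem pvSeg_ne_nil (nums : List Int) {i j : Int} (hi : 0 ≤ i) (hij : i ≤ j)
    (hj : j < (nums.length : Int)) :
    PySem.List.slice nums (some i) (some (j + 1)) ≠ [] := by
  rw [pvSeg_eq nums hi hij]
  apply List.ne_nil_of_length_pos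
  simp only [List.length_take, List.length_drop]
  omega

theorem pvSegMin_singleton (nums : List Int) {i : Int} (hi : 0 ≤ i)
    (hj : i < (nums.length : Int)) :
    pvSegMin nums i i = PySem.List.pyGetD nums i 0 := by
  unfold pvSegMin
  rw [pvSeg_eq nums hi le_rfl, show (i - i).toNat + 1 = 1 by omega,
    List.drop_eq_getElem_cons (show i.toNat < nums.length by omega),
    List.take_succ_cons, List.take_zero,
    PySem.List.pyGetD_eq_getElem nums 0 hi hj]
  rfl

theorem pvGet_mem_seg_right (nums : List Int) {i j : Int} (hi : 0 ≤ i) (hij : i ≤ j)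
    (hj : j < (nums.length : Int)) :
    PySem.List.pyGetD nums j 0 ∈ PySem.List.slice nums (some i) (some (j + 1)) := by
  rw [pvSeg_eq nums hi hij]
  have hlt : (j - i).toNat < ((nums.drop i.toNat).take ((j - i).toNat + 1)).length := by
    simp only [List.length_take, List.length_drop]
    omega
  have hval : ((nums.drop i.toNat).take ((j - i).toNat + 1))[(j - i).toNat] =
      PySem.List.pyGetD nums j 0 := by
    rw [List.getElem_take, List.getElem_drop,
      PySem.List.pyGetD_eq_getElem nums 0 (by omega) hj]
    simp [show i.toNat + (j - i).toNat = j.toNat by omega]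
  exact hval ▸ List.getElem_mem hlt

theorem pvSegMin_idem_right (nums : List Int) {i j : Int} (hi : 0 ≤ i) (hij : i ≤ j)
    (hj : j < (nums.length : Int)) :
    min (pvSegMin nums i j) (PySem.List.pyGetD nums j 0) = pvSegMin nums i j :=
  min_eq_left (pvListMin_le _ _ (pvGet_mem_seg_right nums hi hij hj))

theorem pvSegMin_right (nums : List Int) {i j : Int} (hi : 0 ≤ i) (hij : i ≤ j)
    (hj : j + 1 < (nums.length : Int)) :
    pvSegMin nums i (j + 1) = min (pvSegMin nums i j) (PySem.List.pyGetD nums (j + 1) 0) := by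
  unfold pvSegMin
  rw [pvSeg_eq nums hi (by omega), pvSeg_eq nums hi hij,
    show ((j + 1) - i).toNat + 1 = ((j - i).toNat + 1) + 1 by omega,
    List.take_add_one]
  have hlt : (j - i).toNat + 1 < (nums.drop i.toNat).length := by
    simp only [List.length_drop]; omega
  rw [List.getElem?_eq_getElem hlt]
  have hne : (nums.drop i.toNat).take ((j - i).toNat + 1) ≠ [] := by
    have := pvSeg_ne_nil nums hi hij (by omega)
    rwa [pvSeg_eq nums hi hij] at this
  rw [Option.toList_some, pvListMin_append _ _ hne]
  congr 1
  rw [List.getElem_drop, PySem.List.pyGetD_eq_getElem nums 0 (by omega) hj]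
  simp [show i.toNat + ((j - i).toNat + 1) = (j + 1).toNat by omega]

theorem pvSegMin_left (nums : List Int) {i j : Int} (hi : 0 ≤ i) (hij : i < j)
    (hj : j < (nums.length : Int)) :
    pvSegMin nums i j = min (PySem.List.pyGetD nums i 0) (pvSegMin nums (i + 1) j) := by
  unfold pvSegMin
  have hne : (nums.drop (i + 1).toNat).take ((j - (i + 1)).toNat + 1) ≠ [] := by
    have h := pvSeg_ne_nil nums (i := i + 1) (j := j) (by omega) (by omega) hj
    rwa [pvSeg_eq nums (by omega) (by omega)] at h
  rw [pvSeg_eq nums hi (le_of_lt hij), pvSeg_eq nums (by omega) (by omega),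
    List.drop_eq_getElem_cons (show i.toNat < nums.length by omega),
    List.take_succ_cons]
  rw [show ((i : Int) + 1).toNat = i.toNat + 1 by omega,
    show (j - (i + 1)).toNat + 1 = (j - i).toNat by omega] at hne ⊢
  rw [pvListMin_cons _ _ hne, PySem.List.pyGetD_eq_getElem nums 0 hi (by omega)]

theorem pvAmin (nums : List Int) {i j : Int} (hi : 0 ≤ i) (hij : i ≤ j)
    (hj : j < (nums.length : Int)) :
    (PySem.List.min? (PySem.List.slice nums (some i) (some (j + 1))) (fun x => x)).getD 0
      = pvSegMin nums i j := by
  have hne := pvSeg_ne_nil nums hi hij hj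
  unfold pvSegMin
  cases hseg : PySem.List.slice nums (some i) (some (j + 1)) with
  | nil => exact absurd hseg hne
  | cons x t => rw [PySem.List.min?_id_cons]; simp [pvListMin]

theorem pvFoldlConst {α : Type} (l : List α) (s : Int) :
    l.foldl (fun a (_ : α) => a) s = s := by
  induction l with
  | nil => rfl
  | cons x t ih => exact ih

/-- Inner loop: B's running minimum computes A's slice minimum for every j. -/
theorem pvInner (nums : List Int) (i : Int) (hi : 0 ≤ i) :
    ∀ (m : Nat) (c : Int), ((nums.length : Int) - c).toNat = m → i ≤ c →
    ∀ (cur ms : Int),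
      (c < (nums.length : Int) → min cur (PySem.List.pyGetD nums c 0) = pvSegMin nums i c) →
    ((PySem.List.pyRange c (nums.length : Int) 1).foldl (fun (t : Int × Int) j =>
        let cur := min t.1 (PySem.List.pyGetD nums j 0)
        (cur, max t.2 (cur * (j - i + 1)))) (cur, ms)).2
      = (PySem.List.pyRange c (nums.length : Int) 1).foldl
          (fun ms j => max ms (pvSegMin nums i j * (j - i + 1))) ms := by
  intro m
  induction m with
  | zero =>
    intro c hc hic cur ms hcur
    rw [PySem.List.pyRange_one_eq_nil (by omega)]
    rfl
  | succ m ih =>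
    intro c hc hic cur ms hcur
    have hcn : c < (nums.length : Int) := by omega
    rw [PySem.List.pyRange_one_cons hcn]
    simp only [List.foldl_cons]
    rw [hcur hcn]
    exact ih (c + 1) (by omega) (by omega) _ _
      (fun h => (pvSegMin_right nums hi hic h).symm)

/-- Outer loop: B's left running minimum feeds the inner loop with min(nums[i..k]). -/
theorem pvOuter (nums : List Int) (k : Int) (_hk0 : 0 ≤ k) (hkn : k < (nums.length : Int)) :
    ∀ (m : Nat) (c : Int), (c + 1).toNat = m → c ≤ k →
    ∀ (lm ms : Int),
      (0 ≤ c → min lm (PySem.List.pyGetD nums c 0) = pvSegMin nums c k) →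
    ((PySem.List.pyRange c (-1) (-1)).foldl (fun (s : Int × Int) i =>
        let left_min := min s.1 (PySem.List.pyGetD nums i 0)
        let r := (PySem.List.pyRange k (nums.length : Int) 1).foldl (fun (t : Int × Int) j =>
            let cur := min t.1 (PySem.List.pyGetD nums j 0)
            (cur, max t.2 (cur * (j - i + 1)))) (left_min, s.2)
        (left_min, r.2)) (lm, ms)).2
      = (PySem.List.pyRange c (-1) (-1)).foldl (fun ms i =>
          (PySem.List.pyRange k (nums.length : Int) 1).foldl
            (fun ms j => max ms (pvSegMin nums i j * (j - i + 1))) ms) ms := by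
  intro m
  induction m with
  | zero =>
    intro c hc hck lm ms hlm
    rw [PySem.List.pyRange_neg_one_eq_nil (by omega)]
    rfl
  | succ m ih =>
    intro c hc hck lm ms hlm
    have hc0 : 0 ≤ c := by omega
    rw [PySem.List.pyRange_neg_one_cons (by omega)]
    simp only [List.foldl_cons]
    rw [hlm hc0]
    rw [pvInner nums c hc0 ((nums.length : Int) - k).toNat k rfl hck
      (pvSegMin nums c k) ms (fun _ => pvSegMin_idem_right nums hc0 hck hkn)]
    exact ih (c - 1) (by omega) (by omega) _ _ (fun h => by
      rw [min_comm]
      have hle := pvSegMin_left nums (i := c - 1) (j := k) (by omega) (by omega) hkn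
      rw [show c - 1 + 1 = c by ring] at hle
      exact hle.symm)

-- ===== VERDICT (by name: the statement is the Claim_ definition above) =====
theorem maximumScoreBruteForce_spec : Claim_equal_maximumScoreBruteForce := by
  intro nums k _
  unfold Spec_maximumScoreBruteForce maximumScoreBruteForce maximumScoreBruteForce_alt
  simp only []
  by_cases hneg : k < 0
  · rw [if_pos (Or.inl hneg), PySem.List.pyRange_neg_one_eq_nil (by omega)]
    rfl
  by_cases hbig : (nums.length : Int) ≤ k
  · rw [if_pos (Or.inr hbig), PySem.List.pyRange_one_eq_nil hbig]
    simp only [List.foldl_nil]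
    rw [pvFoldlConst]
  · rw [if_neg (fun hor => hor.elim hneg hbig)]
    have hA : (PySem.List.pyRange k (-1) (-1)).foldl (fun max_score i =>
        (PySem.List.pyRange k (nums.length : Int) 1).foldl (fun max_score j =>
          max max_score ((PySem.List.min? (PySem.List.slice nums (some i) (some (j + 1)))
            (fun x => x)).getD 0 * (j - i + 1))) max_score) 0
      = (PySem.List.pyRange k (-1) (-1)).foldl (fun ms i =>
          (PySem.List.pyRange k (nums.length : Int) 1).foldl
            (fun ms j => max ms (pvSegMin nums i j * (j - i + 1))) ms) 0 := by
      apply PySem.List.foldl_congr_mem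
      intro acc i hmem
      have hi := (PySem.List.mem_pyRange_neg_one.mp hmem)
      apply PySem.List.foldl_congr_mem
      intro acc' j hmem'
      have hj := (PySem.List.mem_pyRange_one.mp hmem')
      rw [pvAmin nums (by omega) (by omega) (by omega)]
    rw [hA]
    exact (pvOuter nums k (by omega) (by omega) (k + 1).toNat k rfl le_rfl _ 0
      (fun _ => by rw [min_self, pvSegMin_singleton nums (by omega) (by omega)])).symm
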